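-- pv_equiv track=rewrite | github.com/jlnn4171/projects | python/bioinformatics/addGaps.py | insertAllGaps
-- ===== SOURCE A (Python) =====
-- def insertOneGap(strng):
--     alignments = []
--     for i in range(len(strng)):
--         newStrng = strng[0:i] + '-' + strng[i:len(strng)]
--         alignments = alignments + [newStrng]
--     alignments = alignments + [strng + '-']
--     return alignments
--
-- def Union(list1, list2):
--     for a in list2:
--         if a not in list1:
--             list1 = list1 + [a]
--     return list1
--
-- def insertAllGaps(strng, gaps):
--     # List of alignments starts with the initial string
--     alignments = [strng]
--
--     # Loop to insert one gap at a time
--     for i in range(gaps):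
--
--         # Initialize list of new alignments with i gaps in the string
--         newAlignments = []
--
--         # For every string in the list of alignments
--         for st in alignments:
--             # Insert one gap in each alignment in the list
--             al = insertOneGap(st)
--
--             # Add the new alignment to the list of new alignments being created
--             newAlignments = Union(newAlignments,al)
--
--         # The alignments list now becomes the new alignments list to now
--         # add another gap to each of the alignments in the new list
--         alignments = newAlignments
--     return alignments
-- ===== SOURCE B (Python) =====
-- def insertAllGaps(strng, gaps):
--     # Generate the alignments directly by recursion on the string instead of
--     # iterative one-gap expansion with Union dedup: an alignment of
--     # s with g gaps either starts with a gap (then the rest aligns s with g-1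
--     # gaps) or starts with the first character of s (then the rest aligns
--     # s[1:] with g gaps).  This emits the alignments in exactly A's order;
--     # duplicates (possible only when strng itself contains '-') are removed
--     # once at the end, keeping first occurrences.
--     def gen(s, g):
--         if g == 0:
--             return [s]
--         if s == "":
--             return ['-' * g]
--         return ['-' + t for t in gen(s, g - 1)] + [s[0] + t for t in gen(s[1:], g)]
--     return list(dict.fromkeys(gen(strng, max(gaps, 0))))
-- ===== Notes on version B (the rewrite author's own statement) =====
-- stated objective: alternative
-- what changed: Replaces the per-gap breadth-first expansion with Union deduplication by a direct recursive generation of all alignments (gap-first vs character-first recursion on the string), emitting them in the same order, with a single ordered dedup pass at the end.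
import Mathlib
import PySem

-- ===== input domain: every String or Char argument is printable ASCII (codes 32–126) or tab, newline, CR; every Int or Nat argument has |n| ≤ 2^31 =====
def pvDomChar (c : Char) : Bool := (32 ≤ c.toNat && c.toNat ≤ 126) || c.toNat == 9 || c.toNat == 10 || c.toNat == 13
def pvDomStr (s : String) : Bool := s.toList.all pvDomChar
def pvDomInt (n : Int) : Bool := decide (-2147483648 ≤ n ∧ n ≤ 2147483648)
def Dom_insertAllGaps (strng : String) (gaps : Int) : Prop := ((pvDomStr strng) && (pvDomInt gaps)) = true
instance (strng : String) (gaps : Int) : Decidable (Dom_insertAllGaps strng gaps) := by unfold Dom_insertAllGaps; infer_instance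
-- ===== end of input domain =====

-- B replaces A's per-gap breadth-first expansion with Union dedup by a direct recursive
-- generation of the alignments in the same order, deduplicated once at the end (alternative algorithm).


-- ===== PORT A =====
-- Python '+' on str, ported by hand (exact: a Python str is its list of code points).
def pvCat (a b : String) : String := String.ofList (a.toList ++ b.toList)

def insertOneGap (strng : String) : List String :=
  ((PySem.List.pyRange 0 (PySem.Str.len strng) 1).foldl
      (fun alignments i =>
        alignments ++ [pvCat (pvCat (PySem.Str.slice strng (some 0) (some i)) "-")
                             (PySem.Str.slice strng (some i) (some (PySem.Str.len strng)))]) [])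
    ++ [pvCat strng "-"]

def pvUnion (list1 list2 : List String) : List String :=
  list2.foldl (fun list1 a => if a ∈ list1 then list1 else list1 ++ [a]) list1

def insertAllGaps (strng : String) (gaps : Int) : List String :=
  (PySem.List.pyRange 0 gaps 1).foldl
    (fun alignments _i =>
      alignments.foldl (fun newAlignments st => pvUnion newAlignments (insertOneGap st)) [])
    [strng]

-- ===== PORT B =====
-- Source B's recursive gen, on the code-point list of the string ('-'+t, s[0]+t, s[1:] are
-- cons/head/tail of the list); '-'*g is List.replicate g '-'; max(gaps,0) is Int.toNat.
def pvGen : List Char → Nat → List (List Char)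
  | s, 0 => [s]
  | [], g+1 => [List.replicate (g+1) '-']
  | c :: t, g+1 =>
      ((pvGen (c :: t) g).map (fun u => '-' :: u)) ++ ((pvGen t (g+1)).map (fun u => c :: u))
termination_by s g => (g, s.length)

-- list(dict.fromkeys(...)) is PySem.List.dedup (first occurrences, in order).
def insertAllGaps_alt (strng : String) (gaps : Int) : List String :=
  PySem.List.dedup ((pvGen strng.toList gaps.toNat).map String.ofList)

-- ===== PRECONDITION & SPEC =====
def Spec_insertAllGaps (strng : String) (gaps : Int) (out : List String) : Prop := out = insertAllGaps_alt strng gaps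
instance (strng : String) (gaps : Int) (out : List String) : Decidable (Spec_insertAllGaps strng gaps out) := by unfold Spec_insertAllGaps; infer_instance

-- ===== CLAIM (what is proved, stated in full; the proofs are below) =====
def Claim_equal_insertAllGaps : Prop := ∀ (strng : String) (gaps : Int), Dom_insertAllGaps strng gaps → Spec_insertAllGaps strng gaps (insertAllGaps strng gaps)

-- ===== LEMMAS AND PROOFS =====

def pvGo {α : Type} [DecidableEq α] (S : List α) : List α → List α
  | [] => []
  | x :: xs => if x ∈ S then pvGo S xs else x :: pvGo (x :: S) xs

theorem pvGo_congr {α : Type} [DecidableEq α] :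
    ∀ (l : List α) {S S' : List α}, (∀ y, y ∈ S ↔ y ∈ S') → pvGo S l = pvGo S' l := by
  intro l
  induction l with
  | nil => intro S S' h; simp [pvGo]
  | cons x xs ih =>
    intro S S' h
    simp only [pvGo]
    by_cases hx : x ∈ S
    · rw [if_pos hx, if_pos ((h x).mp hx)]; exact ih h
    · rw [if_neg hx, if_neg (fun c => hx ((h x).mpr c))]
      congr 1
      exact ih (by intro y; simp [h y])

theorem mem_pvGo {α : Type} [DecidableEq α] {x : α} :
    ∀ {l S : List α}, x ∈ pvGo S l ↔ x ∈ l ∧ x ∉ S := by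
  intro l
  induction l with
  | nil => intro S; simp [pvGo]
  | cons y ys ih =>
    intro S
    simp only [pvGo]
    by_cases hy : y ∈ S
    · rw [if_pos hy, ih]
      constructor
      · rintro ⟨h1, h2⟩; exact ⟨List.mem_cons_of_mem _ h1, h2⟩
      · rintro ⟨h1, h2⟩
        rcases List.mem_cons.mp h1 with h | h
        · exact absurd (h ▸ hy) h2
        · exact ⟨h, h2⟩
    · rw [if_neg hy]
      simp only [List.mem_cons, ih]
      constructor
      · rintro (rfl | ⟨h1, h2⟩)
        · exact ⟨Or.inl rfl, hy⟩
        · exact ⟨Or.inr h1, fun c => h2 (Or.inr c)⟩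
      · rintro ⟨rfl | h1, h2⟩
        · exact Or.inl rfl
        · by_cases hxy : x = y
          · exact Or.inl hxy
          · exact Or.inr ⟨h1, by simp [hxy, h2]⟩

theorem pvGo_append {α : Type} [DecidableEq α] :
    ∀ (a S b : List α), pvGo S (a ++ b) = pvGo S a ++ pvGo (a ++ S) b := by
  intro a
  induction a with
  | nil => intro S b; simp [pvGo]
  | cons x xs ih =>
    intro S b
    simp only [List.cons_append, pvGo]
    by_cases hx : x ∈ S
    · rw [if_pos hx, if_pos hx, ih]
      congr 1
      exact pvGo_congr b (by intro y; simp [List.mem_cons]; intro h; subst h; simp [hx])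
    · rw [if_neg hx, if_neg hx, ih]
      simp only [List.cons_append]
      congr 2
      exact pvGo_congr b (by intro y; simp [List.mem_cons]; tauto)

theorem pvGo_filter {α : Type} [DecidableEq α] :
    ∀ (l S T : List α), (∀ x ∈ T, x ∈ S) →
      pvGo S l = (pvGo T l).filter (fun y => decide (y ∉ S)) := by
  intro l
  induction l with
  | nil => intro S T h; simp [pvGo]
  | cons x xs ih =>
    intro S T h
    simp only [pvGo]
    by_cases hT : x ∈ T
    · rw [if_pos hT, if_pos (h x hT)]
      exact ih S T h
    · rw [if_neg hT]
      by_cases hS : x ∈ S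
      · rw [if_pos hS]
        simp only [List.filter_cons, decide_eq_true_eq]
        rw [if_neg (by simp [hS])]
        exact ih S (x :: T) (by intro y hy; rcases List.mem_cons.mp hy with rfl | hy; exact hS; exact h y hy)
      · rw [if_neg hS]
        simp only [List.filter_cons, decide_eq_true_eq]
        rw [if_pos (by simp [hS])]
        congr 1
        rw [ih (x :: S) (x :: T) (by intro y hy; rcases List.mem_cons.mp hy with rfl | hy; exact List.mem_cons_self; exact List.mem_cons_of_mem _ (h y hy))]
        apply List.filter_congr
        intro y hy
        have : y ∉ (x :: T) := (mem_pvGo.mp hy).2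
        have hyx : y ≠ x := fun c => this (c ▸ List.mem_cons_self)
        simp [List.mem_cons, hyx]

theorem pvGo_eq_filter {α : Type} [DecidableEq α] (l S : List α) :
    pvGo S l = (pvGo [] l).filter (fun y => decide (y ∉ S)) :=
  pvGo_filter l S [] (by simp)

theorem pvGo_nil_of_subset {α : Type} [DecidableEq α] :
    ∀ {l S : List α}, (∀ x ∈ l, x ∈ S) → pvGo S l = [] := by
  intro l
  induction l with
  | nil => intro S _; simp [pvGo]
  | cons x xs ih =>
    intro S h
    simp only [pvGo]
    rw [if_pos (h x List.mem_cons_self)]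
    exact ih (fun y hy => h y (List.mem_cons_of_mem _ hy))

theorem pvGo_map {α β : Type} [DecidableEq α] [DecidableEq β] {f : α → β}
    (hf : Function.Injective f) :
    ∀ (l : List α) (S : List β) (S' : List α), (∀ x, f x ∈ S ↔ x ∈ S') →
      pvGo S (l.map f) = (pvGo S' l).map f := by
  intro l
  induction l with
  | nil => intro S S' h; simp [pvGo]
  | cons x xs ih =>
    intro S S' h
    simp only [List.map_cons, pvGo]
    by_cases hx : f x ∈ S
    · rw [if_pos hx, if_pos ((h x).mp hx)]
      exact ih S S' h
    · rw [if_neg hx, if_neg (fun c => hx ((h x).mpr c))]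
      simp only [List.map_cons]
      congr 1
      apply ih
      intro y
      simp only [List.mem_cons]
      constructor
      · rintro (hc | hc)
        · exact Or.inl (hf hc)
        · exact Or.inr ((h y).mp hc)
      · rintro (rfl | hc)
        · exact Or.inl rfl
        · exact Or.inr ((h y).mpr hc)

theorem pvGo_cons_cons {α : Type} [DecidableEq α] (S l : List α) (x : α) :
    pvGo S (x :: x :: l) = pvGo S (x :: l) := by
  conv_lhs => rw [pvGo]
  by_cases hx : x ∈ S
  · rw [if_pos hx]
  · rw [if_neg hx]
    conv_lhs => rw [pvGo]
    rw [if_pos List.mem_cons_self]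
    conv_rhs => rw [pvGo]
    rw [if_neg hx]

theorem pvGo_flatMap_cons {α β : Type} [DecidableEq β] {h : α → β} {f : α → List β} :
    ∀ (L : List α) (S : List β), (∀ u ∈ L, h u ∈ S ∨ ∃ r, f u = h u :: r) →
      pvGo S (L.flatMap (fun u => h u :: f u)) = pvGo S (L.flatMap f) := by
  intro L
  induction L with
  | nil => intro S _; simp [pvGo]
  | cons u L' ih =>
    intro S hyp
    simp only [List.flatMap_cons]
    rcases hyp u List.mem_cons_self with hS | ⟨r, hr⟩
    · show pvGo S (h u :: (f u ++ L'.flatMap _)) = _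
      simp only [pvGo, if_pos hS]
      rw [pvGo_append, pvGo_append]
      congr 1
      exact ih (f u ++ S) (by
        intro v hv
        rcases hyp v (List.mem_cons_of_mem _ hv) with hc | hc
        · exact Or.inl (List.mem_append_right _ hc)
        · exact Or.inr hc)
    · have e1 : (h u :: f u) ++ L'.flatMap (fun u => h u :: f u)
              = h u :: h u :: (r ++ L'.flatMap (fun u => h u :: f u)) := by rw [hr]; simp
      have e2 : f u ++ L'.flatMap (fun u => h u :: f u)
              = h u :: (r ++ L'.flatMap (fun u => h u :: f u)) := by rw [hr]; simp
      calc pvGo S ((h u :: f u) ++ L'.flatMap (fun u => h u :: f u))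
          = pvGo S (h u :: h u :: (r ++ L'.flatMap (fun u => h u :: f u))) := by rw [e1]
        _ = pvGo S (h u :: (r ++ L'.flatMap (fun u => h u :: f u))) := pvGo_cons_cons ..
        _ = pvGo S (f u ++ L'.flatMap (fun u => h u :: f u)) := by rw [e2]
        _ = pvGo S (f u) ++ pvGo (f u ++ S) (L'.flatMap (fun u => h u :: f u)) := pvGo_append ..
        _ = pvGo S (f u) ++ pvGo (f u ++ S) (L'.flatMap f) := by
              rw [ih (f u ++ S) (by
                intro v hv
                rcases hyp v (List.mem_cons_of_mem _ hv) with hc | hc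
                · exact Or.inl (List.mem_append_right _ hc)
                · exact Or.inr hc)]
        _ = pvGo S (f u ++ L'.flatMap f) := (pvGo_append ..).symm

theorem pvGo_flatMap_go {α : Type} [DecidableEq α] {f : α → List α} :
    ∀ (X SX SE : List α), (∀ x ∈ SX, ∀ z ∈ f x, z ∈ SE) →
      pvGo SE ((pvGo SX X).flatMap f) = pvGo SE (X.flatMap f) := by
  intro X
  induction X with
  | nil => intro SX SE _; simp [pvGo]
  | cons x X' ih =>
    intro SX SE hyp
    simp only [pvGo, List.flatMap_cons]
    by_cases hx : x ∈ SX
    · rw [if_pos hx, pvGo_append, pvGo_nil_of_subset (hyp x hx), List.nil_append]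
      rw [ih SX SE hyp]
      apply pvGo_congr
      intro y
      constructor
      · intro hy; exact List.mem_append_right _ hy
      · intro hy
        rcases List.mem_append.mp hy with hy | hy
        · exact hyp x hx y hy
        · exact hy
    · rw [if_neg hx]
      simp only [List.flatMap_cons]
      rw [pvGo_append, pvGo_append]
      congr 1
      exact ih (x :: SX) (f x ++ SE) (by
        intro v hv z hz
        rcases List.mem_cons.mp hv with rfl | hv
        · exact List.mem_append_left _ hz
        · exact List.mem_append_right _ (hyp v hv z hz))

def pvUnionC {α : Type} [DecidableEq α] (l1 l2 : List α) : List α :=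
  l2.foldl (fun l1 a => if a ∈ l1 then l1 else l1 ++ [a]) l1

theorem pvUnionC_eq_go {α : Type} [DecidableEq α] :
    ∀ (l2 l1 : List α), pvUnionC l1 l2 = l1 ++ pvGo l1 l2 := by
  intro l2
  induction l2 with
  | nil => intro l1; simp [pvUnionC, pvGo]
  | cons x xs ih =>
    intro l1
    simp only [pvUnionC, List.foldl_cons, pvGo]
    by_cases hx : x ∈ l1
    · rw [if_pos hx, if_pos hx]
      exact ih l1
    · rw [if_neg hx, if_neg hx]
      show pvUnionC (l1 ++ [x]) xs = _
      rw [ih (l1 ++ [x])]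
      rw [pvGo_congr xs (S := l1 ++ [x]) (S' := x :: l1) (by intro y; simp; tauto)]
      simp

def pvIog : List Char → List (List Char)
  | [] => [['-']]
  | c :: t => ('-' :: c :: t) :: (pvIog t).map (fun u => c :: u)

theorem pvIog_head : ∀ u : List Char, ∃ r, pvIog u = ('-' :: u) :: r := by
  intro u
  cases u with
  | nil => exact ⟨[], rfl⟩
  | cons c t => exact ⟨_, rfl⟩

theorem pvIog_spec : ∀ u : List Char,
    pvIog u = (List.range u.length).map (fun k => u.take k ++ '-' :: u.drop k) ++ [u ++ ['-']] := by
  intro u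
  induction u with
  | nil => simp [pvIog]
  | cons c t ih =>
    simp only [pvIog, ih, List.length_cons, List.range_succ_eq_map, List.map_cons, List.map_map,
      List.map_append]
    simp [Function.comp_def]

theorem pvGen_nil (g : Nat) : pvGen [] g = [List.replicate g '-'] := by
  cases g with
  | zero => simp [pvGen]
  | succ n => simp [pvGen]

theorem pvIog_replicate (g : Nat) :
    pvIog (List.replicate g '-') = List.replicate (g+1) (List.replicate (g+1) '-') := by
  induction g with
  | zero => rfl
  | succ n ih =>
    show pvIog ('-' :: List.replicate n '-') = _
    simp only [pvIog, ih, List.map_replicate]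
    simp [List.replicate_succ]

theorem pvGo_replicate {α : Type} [DecidableEq α] (n : Nat) (x : α) :
    pvGo [] (List.replicate (n+1) x) = [x] := by
  rw [List.replicate_succ]
  show (if x ∈ ([] : List α) then _ else x :: pvGo [x] (List.replicate n x)) = [x]
  rw [if_neg (List.not_mem_nil)]
  rw [pvGo_nil_of_subset (by intro y hy; simpa using (List.eq_of_mem_replicate hy))]

theorem pvConsInj (c : Char) : Function.Injective (fun u : List Char => c :: u) := by
  intro a b h; simpa using h

theorem pvMemMapCons (c : Char) (x : List Char) (L : List (List Char)) :
    c :: x ∈ L.map (fun u => c :: u) ↔ x ∈ L := by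
  constructor
  · intro h
    rcases List.mem_map.mp h with ⟨y, hy, he⟩
    have : y = x := by simpa using he
    exact this ▸ hy
  · intro h; exact List.mem_map_of_mem h

theorem pvK : ∀ (g : Nat) (l : List Char),
    pvGo [] ((pvGen l g).flatMap pvIog) = pvGo [] (pvGen l (g+1)) := by
  intro g
  induction g with
  | zero =>
    intro l
    induction l with
    | nil => simp [pvGen, pvIog, pvGo, List.replicate]
    | cons c t ih =>
      have ih' : pvGo [] (pvIog t) = pvGo [] (pvGen t 1) := by
        simpa [pvGen] using ih
      have e1 : (pvGen (c :: t) 0).flatMap pvIog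
          = [('-' :: c :: t)] ++ (pvIog t).map (fun u => c :: u) := by
        simp [pvGen, pvIog]
      have e2 : pvGen (c :: t) 1
          = [('-' :: c :: t)] ++ (pvGen t 1).map (fun u => c :: u) := by
        rw [pvGen]; simp [pvGen]
      rw [e1, e2, pvGo_append, pvGo_append]
      congr 1
      rw [pvGo_eq_filter, pvGo_eq_filter (S := [('-' :: c :: t)] ++ [])]
      rw [pvGo_map (pvConsInj c) (pvIog t) [] [] (by simp),
          pvGo_map (pvConsInj c) (pvGen t 1) [] [] (by simp), ih']
  | succ g IHg =>
    intro l
    induction l with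
    | nil =>
      rw [pvGen_nil, pvGen_nil]
      simp only [List.flatMap_cons, List.flatMap_nil, List.append_nil]
      rw [pvIog_replicate, pvGo_replicate]
      have := pvGo_replicate 0 (List.replicate (g+1+1) '-')
      simpa using this.symm
    | cons c t IHl =>
      have eN : pvGen (c :: t) (g+1)
          = (pvGen (c :: t) g).map (fun u => '-' :: u) ++ (pvGen t (g+1)).map (fun u => c :: u) := by
        rw [pvGen]
      have eN2 : pvGen (c :: t) (g+2)
          = (pvGen (c :: t) (g+1)).map (fun u => '-' :: u) ++ (pvGen t (g+2)).map (fun u => c :: u) := by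
        rw [pvGen]
      set A := pvGen (c :: t) g with hA
      set B := pvGen t (g+1) with hB
      set N := pvGen (c :: t) (g+1) with hN
      set B' := pvGen t (g+2) with hB'
      -- the two flatMap blocks
      have eP : (A.map (fun u => '-' :: u)).flatMap pvIog
          = A.flatMap (fun u => ('-' :: '-' :: u) :: (pvIog u).map (fun v => '-' :: v)) := by
        rw [List.flatMap_map]; rfl
      have eQ : (B.map (fun u => c :: u)).flatMap pvIog
          = B.flatMap (fun u => ('-' :: c :: u) :: (pvIog u).map (fun v => c :: v)) := by
        rw [List.flatMap_map]; rfl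
      -- Part 1 : pvGo [] P = map d (pvGo [] N)
      have part1 : pvGo [] ((A.map (fun u => '-' :: u)).flatMap pvIog)
          = (pvGo [] N).map (fun u => '-' :: u) := by
        rw [eP]
        rw [pvGo_flatMap_cons A [] (by
          intro u _
          right
          rcases pvIog_head u with ⟨r, hr⟩
          exact ⟨r.map (fun v => '-' :: v), by rw [hr]; simp⟩)]
        rw [show A.flatMap (fun u => (pvIog u).map (fun v => '-' :: v))
            = (A.flatMap pvIog).map (fun v => '-' :: v) from (List.map_flatMap).symm]
        rw [pvGo_map (pvConsInj '-') (A.flatMap pvIog) [] [] (by simp)]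
        rw [IHg (c :: t)]
      -- membership of P
      have hPmem : ∀ y, y ∈ (A.map (fun u => '-' :: u)).flatMap pvIog ++ ([] : List (List Char))
          ↔ y ∈ N.map (fun u => '-' :: u) := by
        intro y
        rw [List.append_nil]
        constructor
        · intro hy
          have : y ∈ pvGo [] ((A.map (fun u => '-' :: u)).flatMap pvIog) :=
            mem_pvGo.mpr ⟨hy, by simp⟩
          rw [part1] at this
          rcases List.mem_map.mp this with ⟨z, hz, he⟩
          exact he ▸ List.mem_map_of_mem (mem_pvGo.mp hz).1
        · intro hy
          rcases List.mem_map.mp hy with ⟨z, hz, he⟩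
          have : y ∈ pvGo [] ((A.map (fun u => '-' :: u)).flatMap pvIog) := by
            rw [part1]
            exact he ▸ List.mem_map_of_mem (mem_pvGo.mpr ⟨hz, by simp⟩)
          exact (mem_pvGo.mp this).1
      -- start
      rw [eN, List.flatMap_append, pvGo_append, part1, eN2, pvGo_append]
      rw [pvGo_map (pvConsInj '-') N [] [] (by simp)]
      congr 1
      rw [pvGo_congr _ hPmem, pvGo_congr _ (show ∀ y, y ∈ N.map (fun u => '-' :: u) ++ ([] : List (List Char)) ↔ y ∈ N.map (fun u => '-' :: u) by intro y; rw [List.append_nil])]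
      rw [eQ]
      rw [pvGo_flatMap_cons B (N.map (fun u => '-' :: u)) (by
        intro u hu
        left
        have : c :: u ∈ N := by
          rw [eN]
          exact List.mem_append_right _ (List.mem_map_of_mem hu)
        exact List.mem_map_of_mem this)]
      rw [show B.flatMap (fun u => (pvIog u).map (fun v => c :: v))
          = (B.flatMap pvIog).map (fun v => c :: v) from (List.map_flatMap).symm]
      by_cases hc : c = '-'
      · subst hc
        rw [pvGo_map (pvConsInj '-') (B.flatMap pvIog) (N.map (fun u => '-' :: u)) N
            (by intro x; exact pvMemMapCons '-' x N)]
        rw [pvGo_map (pvConsInj '-') B' (N.map (fun u => '-' :: u)) N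
            (by intro x; exact pvMemMapCons '-' x N)]
        rw [pvGo_eq_filter (B.flatMap pvIog) N, pvGo_eq_filter B' N, IHl]
      · rw [pvGo_map (pvConsInj c) (B.flatMap pvIog) (N.map (fun u => '-' :: u)) []
            (by
              intro x
              simp only [List.mem_map, List.not_mem_nil, iff_false]
              rintro ⟨z, _, he⟩
              have h2 : '-' = c ∧ z = x := by simpa using he
              exact hc h2.1.symm)]
        rw [pvGo_map (pvConsInj c) B' (N.map (fun u => '-' :: u)) []
            (by
              intro x
              simp only [List.mem_map, List.not_mem_nil, iff_false]
              rintro ⟨z, _, he⟩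
              have h2 : '-' = c ∧ z = x := by simpa using he
              exact hc h2.1.symm)]
        rw [IHl]

-- ===== plumbing =====
def pvStep (X : List (List Char)) : List (List Char) :=
  X.foldl (fun nA st => pvUnionC nA (pvIog st)) []

theorem pvFold_union : ∀ (X : List (List Char)) (acc : List (List Char)),
    X.foldl (fun nA st => pvUnionC nA (pvIog st)) acc = acc ++ pvGo acc (X.flatMap pvIog) := by
  intro X
  induction X with
  | nil => intro acc; simp [pvGo]
  | cons u X' ih =>
    intro acc
    simp only [List.foldl_cons, List.flatMap_cons]
    rw [ih (pvUnionC acc (pvIog u)), pvUnionC_eq_go, pvGo_append, ← List.append_assoc]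
    congr 1
    apply pvGo_congr
    intro y
    simp only [List.mem_append, mem_pvGo]
    tauto

theorem pvStep_eq (X : List (List Char)) : pvStep X = pvGo [] (X.flatMap pvIog) := by
  rw [pvStep, pvFold_union, List.nil_append]

theorem pvIter : ∀ (n : Nat) (l : List Char), pvStep^[n] [l] = pvGo [] (pvGen l n) := by
  intro n
  induction n with
  | zero => intro l; simp [pvGen, pvGo]
  | succ n ih =>
    intro l
    rw [Function.iterate_succ_apply', ih l, pvStep_eq,
      pvGo_flatMap_go (pvGen l n) [] [] (by simp), pvK]

theorem pvOfList_inj : Function.Injective String.ofList := by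
  intro a b h; simpa using congrArg String.toList h

theorem pvMemMapOfList (x : List Char) (L : List (List Char)) :
    String.ofList x ∈ L.map String.ofList ↔ x ∈ L := by
  constructor
  · intro h
    rcases List.mem_map.mp h with ⟨y, hy, he⟩
    exact (pvOfList_inj he) ▸ hy
  · exact List.mem_map_of_mem

theorem pvUnion_eq (l1 l2 : List String) : pvUnion l1 l2 = l1 ++ pvGo l1 l2 :=
  pvUnionC_eq_go l2 l1

theorem pvUnion_map (L1 L2 : List (List Char)) :
    pvUnion (L1.map String.ofList) (L2.map String.ofList) = (pvUnionC L1 L2).map String.ofList := by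
  rw [pvUnion_eq, pvUnionC_eq_go, List.map_append]
  congr 1
  exact pvGo_map pvOfList_inj L2 (L1.map String.ofList) L1 (fun x => pvMemMapOfList x L1)

theorem pvDedup_eq_go (xs : List String) : PySem.List.dedup xs = pvGo [] xs := by
  have hadd : PySem.Set.add = (fun (l1 : List String) a => if a ∈ l1 then l1 else l1 ++ [a]) := by
    funext s x
    simp [PySem.Set.add, List.contains_eq_mem]
  have : PySem.List.dedup xs = xs.foldl PySem.Set.add [] := by
    simp [PySem.Set.ofList_eq_foldl]
  rw [this, hadd]
  have := pvUnionC_eq_go xs ([] : List String)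
  simpa [pvUnionC] using this

theorem pvFoldl_const {α ι : Type} (F : α → α) : ∀ (l : List ι) (i : α),
    l.foldl (fun a _ => F a) i = F^[l.length] i := by
  intro l
  induction l with
  | nil => intro i; simp
  | cons x xs ih =>
    intro i
    simp only [List.foldl_cons, List.length_cons, ih, Function.iterate_succ_apply]

theorem insertOneGap_eq (s : String) : insertOneGap s = (pvIog s.toList).map String.ofList := by
  unfold insertOneGap
  rw [PySem.List.foldl_append_singleton_eq_map, List.nil_append, pvIog_spec, List.map_append]
  congr 1
  · have hlen : PySem.Str.len s = ((s.toList.length : Nat) : Int) := by simp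
    rw [hlen, PySem.List.pyRange_one, List.map_map, List.map_map]
    have hm : ((((s.toList.length : Nat) : Int) - 0).toNat) = s.toList.length := by simp
    rw [hm]
    apply List.map_congr_left
    intro k hk
    have hk' : k < s.toList.length := List.mem_range.mp hk
    simp only [Function.comp_apply, zero_add]
    have h1 : (PySem.Str.slice s (some 0) (some (k : Int))).toList = s.toList.take k := by
      simp [PySem.List.slice_to_natCast]
    have h2 : (PySem.Str.slice s (some (k : Int)) (some ((s.toList.length : Nat) : Int))).toList
        = s.toList.drop k := by
      simp only [PySem.Str.toList_slice, PySem.Chars.slice_eq_listSlice]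
      rw [PySem.List.slice_natCast]
      exact List.take_of_length_le (by simp)
    simp only [pvCat, String.toList_ofList]
    rw [h1, h2]
    simp

theorem pvFold_str_bridge : ∀ (X acc : List (List Char)),
    (X.map String.ofList).foldl (fun nA st => pvUnion nA (insertOneGap st)) (acc.map String.ofList)
      = (X.foldl (fun nA st => pvUnionC nA (pvIog st)) acc).map String.ofList := by
  intro X
  induction X with
  | nil => intro acc; simp
  | cons u X' ih =>
    intro acc
    simp only [List.map_cons, List.foldl_cons]
    have hu : insertOneGap (String.ofList u) = (pvIog u).map String.ofList := by
      rw [insertOneGap_eq]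
      simp
    rw [hu, pvUnion_map, ih]

theorem pvIter_str : ∀ (n : Nat) (X : List (List Char)),
    (fun AL => AL.foldl (fun nA st => pvUnion nA (insertOneGap st)) [])^[n] (X.map String.ofList)
      = (pvStep^[n] X).map String.ofList := by
  intro n
  induction n with
  | zero => intro X; simp
  | succ n ih =>
    intro X
    rw [Function.iterate_succ_apply, Function.iterate_succ_apply]
    have : (X.map String.ofList).foldl (fun nA st => pvUnion nA (insertOneGap st)) []
        = (pvStep X).map String.ofList := by
      have := pvFold_str_bridge X []
      simpa [pvStep] using this
    rw [this, ih]

theorem insertAllGaps_eq (s : String) (gaps : Int) :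
    insertAllGaps s gaps = (pvGo [] (pvGen s.toList gaps.toNat)).map String.ofList := by
  have h1 := pvFoldl_const
    (fun alignments : List String => alignments.foldl (fun nA st => pvUnion nA (insertOneGap st)) [])
    (PySem.List.pyRange 0 gaps 1) [s]
  have h2 : (PySem.List.pyRange 0 gaps 1).length = gaps.toNat := by
    simp [PySem.List.length_pyRange_one]
  rw [h2] at h1
  calc insertAllGaps s gaps
      = (fun alignments : List String =>
          alignments.foldl (fun nA st => pvUnion nA (insertOneGap st)) [])^[gaps.toNat] [s] := h1
    _ = _ := by
        rw [show [s] = ([s.toList]).map String.ofList by simp, pvIter_str, pvIter]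

theorem insertAllGaps_alt_eq (s : String) (gaps : Int) :
    insertAllGaps_alt s gaps = (pvGo [] (pvGen s.toList gaps.toNat)).map String.ofList := by
  unfold insertAllGaps_alt
  rw [pvDedup_eq_go]
  exact pvGo_map pvOfList_inj _ [] [] (by simp)

-- ===== VERDICT (by name: the statement is the Claim_ definition above) =====
theorem insertAllGaps_spec : Claim_equal_insertAllGaps := by
  intro strng gaps _
  unfold Spec_insertAllGaps
  rw [insertAllGaps_eq, insertAllGaps_alt_eq]
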